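-- pv_equiv track=rewrite | github.com/jeffrey-m4k/DiamondSquare | ds3d.py | getDiamonds
-- ===== SOURCE A (Python) =====
-- def getDiamonds(aSize, div, squares):
--
-- 	squareVList = []
-- 	coordList = []
-- 	coordListFiltered = []
--
-- 	for x in range(len(squares)):
-- 		squareVList.append([squares[x][0], squares[x][1]])
-- 		squareVList.append([squares[x][0] + (aSize//div), squares[x][1]])
-- 		squareVList.append([squares[x][0], squares[x][1] + (aSize//div)])
-- 		squareVList.append([squares[x][0] + (aSize//div), squares[x][1] + (aSize//div)])
--
-- 	squareVList = list(map(list,set(map(tuple,squareVList))))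
-- 	squareVList.sort()
--
-- 	for x in range(len(squareVList)):
-- 		coordList.append([squareVList[x][0] + aSize//(div*2), squareVList[x][1]])
-- 		coordList.append([squareVList[x][0] - aSize//(div*2), squareVList[x][1]])
-- 		coordList.append([squareVList[x][0], squareVList[x][1] + aSize//(div*2)])
-- 		coordList.append([squareVList[x][0], squareVList[x][1] - aSize//(div*2)])
--
-- 	coordList = list(map(list,set(map(tuple,coordList))))
-- 	for coord in range(len(coordList)):
-- 		if not any(n<0 or n>aSize for n in coordList[coord]):
-- 			coordListFiltered.append(coordList[coord])
-- 	coordListFiltered.sort()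
--
-- 	return coordListFiltered
-- ===== SOURCE B (Python) =====
-- def _insert(out, c):
-- 	i = 0
-- 	while i < len(out) and out[i] < c:
-- 		i += 1
-- 	if i == len(out) or out[i] != c:
-- 		out.insert(i, c)
--
-- def getDiamonds(aSize, div, squares):
-- 	s = aSize // div
-- 	h = aSize // (div * 2)
-- 	out = []
-- 	for sq in squares:
-- 		x, y = sq[0], sq[1]
-- 		for c in ([x + h, y], [x - h, y], [x, y + h], [x, y - h],
-- 		          [x + s + h, y], [x + s - h, y], [x + s, y + h], [x + s, y - h],
-- 		          [x + h, y + s], [x - h, y + s], [x, y + s + h], [x, y + s - h],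
-- 		          [x + s + h, y + s], [x + s - h, y + s], [x + s, y + s + h], [x + s, y + s - h]):
-- 			if 0 <= c[0] <= aSize and 0 <= c[1] <= aSize:
-- 				_insert(out, c)
-- 	return out
-- ===== Notes on version B (the rewrite author's own statement) =====
-- stated objective: alternative
-- what changed: B drops A's hash-set deduplication and its two sorts entirely: it filters each of the 16 per-square diamond coordinates up front and maintains one sorted duplicate-free output list by in-place ordered insertion (skipping coordinates already present), so the result is ready when the single pass ends.
-- outside the precondition, e.g. on getDiamonds(5, 0, []): A returns [], B raises ZeroDivisionError
import Mathlib
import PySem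

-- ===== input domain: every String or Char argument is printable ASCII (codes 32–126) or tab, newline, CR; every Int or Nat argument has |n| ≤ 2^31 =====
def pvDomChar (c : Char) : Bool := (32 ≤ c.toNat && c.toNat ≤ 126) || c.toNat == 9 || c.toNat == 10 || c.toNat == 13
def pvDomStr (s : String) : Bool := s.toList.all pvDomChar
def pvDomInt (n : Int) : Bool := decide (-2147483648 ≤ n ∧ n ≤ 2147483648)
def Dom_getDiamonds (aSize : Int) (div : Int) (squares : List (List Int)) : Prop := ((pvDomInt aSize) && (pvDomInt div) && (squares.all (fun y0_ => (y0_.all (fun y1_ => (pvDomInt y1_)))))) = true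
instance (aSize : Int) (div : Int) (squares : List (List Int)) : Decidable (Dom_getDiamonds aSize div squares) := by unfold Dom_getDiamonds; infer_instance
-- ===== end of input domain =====

-- B replaces A's hash-set dedup and its two sorts by one pass that bounds-filters each of the
-- 16 per-square diamond coordinates up front and keeps the output sorted and duplicate-free by
-- ordered insertion ('alternative' objective; B mutates its own local list only).

-- ===== PORT A =====
-- map(tuple, …) / map(list, …) on a two-element coordinate list
def pvTup (r : List Int) : Int × Int := (PySem.List.pyGetD r 0 0, PySem.List.pyGetD r 1 0)
def pvLst (p : Int × Int) : List Int := [p.1, p.2]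

def getDiamonds (aSize : Int) (div : Int) (squares : List (List Int)) : List (List Int) :=
  let squareVList0 : List (List Int) := squares.foldl (fun acc sq =>
      acc ++ [[PySem.List.pyGetD sq 0 0, PySem.List.pyGetD sq 1 0],
              [PySem.List.pyGetD sq 0 0 + PySem.Int.floordiv aSize div, PySem.List.pyGetD sq 1 0],
              [PySem.List.pyGetD sq 0 0, PySem.List.pyGetD sq 1 0 + PySem.Int.floordiv aSize div],
              [PySem.List.pyGetD sq 0 0 + PySem.Int.floordiv aSize div, PySem.List.pyGetD sq 1 0 + PySem.Int.floordiv aSize div]]) []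
  let squareVList1 : List (List Int) := (PySem.Set.ofList (squareVList0.map pvTup)).map pvLst
  let squareVList : List (List Int) := PySem.List.sorted squareVList1 (fun r => r) false
  let coordList0 : List (List Int) := squareVList.foldl (fun acc v =>
      acc ++ [[PySem.List.pyGetD v 0 0 + PySem.Int.floordiv aSize (div*2), PySem.List.pyGetD v 1 0],
              [PySem.List.pyGetD v 0 0 - PySem.Int.floordiv aSize (div*2), PySem.List.pyGetD v 1 0],
              [PySem.List.pyGetD v 0 0, PySem.List.pyGetD v 1 0 + PySem.Int.floordiv aSize (div*2)],
              [PySem.List.pyGetD v 0 0, PySem.List.pyGetD v 1 0 - PySem.Int.floordiv aSize (div*2)]]) []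
  let coordList : List (List Int) := (PySem.Set.ofList (coordList0.map pvTup)).map pvLst
  let coordListFiltered : List (List Int) := coordList.foldl (fun acc c =>
      if !(c.any (fun n => decide (n < 0) || decide (n > aSize))) then acc ++ [c] else acc) []
  PySem.List.sorted coordListFiltered (fun r => r) false

-- ===== PORT B =====
-- _insert: scan to the first element not < c, insert unless already present
def pvInsert (out : List (List Int)) (c : List Int) : List (List Int) :=
  match out with
  | [] => [c]
  | x :: xs => if x < c then x :: pvInsert xs c else if x = c then x :: xs else c :: x :: xs

-- the 16 diamond coordinates of one square (the literal tuple in B's inner for)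
def pvC16 (s h x y : Int) : List (List Int) :=
  [[x + h, y], [x - h, y], [x, y + h], [x, y - h],
   [x + s + h, y], [x + s - h, y], [x + s, y + h], [x + s, y - h],
   [x + h, y + s], [x - h, y + s], [x, y + s + h], [x, y + s - h],
   [x + s + h, y + s], [x + s - h, y + s], [x + s, y + s + h], [x + s, y + s - h]]

-- 0 <= c[0] <= aSize and 0 <= c[1] <= aSize
def pvInB (aSize : Int) (c : List Int) : Bool :=
  decide (0 ≤ PySem.List.pyGetD c 0 0 ∧ PySem.List.pyGetD c 0 0 ≤ aSize ∧
          0 ≤ PySem.List.pyGetD c 1 0 ∧ PySem.List.pyGetD c 1 0 ≤ aSize)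

def getDiamonds_alt (aSize : Int) (div : Int) (squares : List (List Int)) : List (List Int) :=
  let s := PySem.Int.floordiv aSize div
  let h := PySem.Int.floordiv aSize (div * 2)
  squares.foldl (fun out sq =>
    (pvC16 s h (PySem.List.pyGetD sq 0 0) (PySem.List.pyGetD sq 1 0)).foldl
      (fun out c => if pvInB aSize c then pvInsert out c else out) out) []

-- ===== PRECONDITION & SPEC =====
-- Pre_ excludes div = 0 (A raises ZeroDivisionError whenever squares is nonempty; for squares = []
-- A happens to return [] without ever dividing, but B naturally computes aSize // div up front and
-- raises ZeroDivisionError there) and rows shorter than 2 elements (A raises IndexError on sq[0]/sq[1]).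
def Pre_getDiamonds (_aSize : Int) (div : Int) (squares : List (List Int)) : Prop :=
  div ≠ 0 ∧ ∀ sq ∈ squares, 2 ≤ sq.length
instance (aSize : Int) (div : Int) (squares : List (List Int)) : Decidable (Pre_getDiamonds aSize div squares) := by unfold Pre_getDiamonds; infer_instance
def pvWitness_getDiamonds : Int × Int × List (List Int) := (8, 2, [[0, 0], [4, 0]])
def Spec_getDiamonds (aSize : Int) (div : Int) (squares : List (List Int)) (out : List (List Int)) : Prop := out = getDiamonds_alt aSize div squares
instance (aSize : Int) (div : Int) (squares : List (List Int)) (out : List (List Int)) : Decidable (Spec_getDiamonds aSize div squares out) := by unfold Spec_getDiamonds; infer_instance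

-- ===== CLAIM (what is proved, stated in full; the proofs are below) =====
def Claim_equal_getDiamonds : Prop := ∀ (aSize : Int) (div : Int) (squares : List (List Int)), Dom_getDiamonds aSize div squares → Pre_getDiamonds aSize div squares → Spec_getDiamonds aSize div squares (getDiamonds aSize div squares)

-- ===== LEMMAS AND PROOFS =====

theorem pvTup_pvLst (p : Int × Int) : pvTup (pvLst p) = p := by
  simp [pvTup, pvLst, PySem.List.pyGetD]

theorem pvLst_inj : Function.Injective pvLst := by
  intro p q h
  simp only [pvLst, List.cons.injEq, and_true] at h
  exact Prod.ext h.1 h.2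

-- an append-only accumulation loop is a flatMap
theorem pvFoldl_flatMap {a b : Type} (g : a -> List b) (l : List a) :
    l.foldl (fun acc x => acc ++ g x) [] = l.flatMap g := by
  have := PySem.List.foldl_append_eq_flatMap g l ([] : List b)
  simpa using this

-- membership through pvInsert
theorem mem_pvInsert (out : List (List Int)) (c x : List Int) :
    x ∈ pvInsert out c ↔ x = c ∨ x ∈ out := by
  induction out with
  | nil => simp [pvInsert]
  | cons y ys ih =>
    simp only [pvInsert]
    split_ifs with h1 h2
    · simp only [List.mem_cons, ih]; tauto
    · subst h2
      constructor
      · exact fun hx => Or.inr hx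
      · rintro (rfl | hx)
        · exact List.mem_cons_self
        · exact hx
    · simp

-- pvInsert preserves strict sortedness
theorem pairwise_pvInsert (out : List (List Int)) (c : List Int)
    (h : out.Pairwise (· < ·)) : (pvInsert out c).Pairwise (· < ·) := by
  induction out with
  | nil => simp [pvInsert]
  | cons y ys ih =>
    rcases List.pairwise_cons.mp h with ⟨hy, hys⟩
    simp only [pvInsert]
    split_ifs with h1 h2
    · refine List.pairwise_cons.mpr ⟨?_, ih hys⟩
      intro z hz
      rcases (mem_pvInsert ys c z).mp hz with rfl | hz
      · exact h1
      · exact hy z hz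
    · exact h
    · have hcy : c < y := lt_of_le_of_ne (not_lt.mp h1) (fun e => h2 e.symm)
      refine List.pairwise_cons.mpr ⟨?_, h⟩
      intro z hz
      rcases List.mem_cons.mp hz with rfl | hz
      · exact hcy
      · exact lt_trans hcy (hy z hz)

-- the filtered ordered-insertion fold: membership
theorem mem_foldl_ins (aSize : Int) (l : List (List Int)) (out : List (List Int)) (x : List Int) :
    x ∈ l.foldl (fun o c => if pvInB aSize c then pvInsert o c else o) out
      ↔ x ∈ out ∨ ∃ c ∈ l, pvInB aSize c ∧ x = c := by
  induction l generalizing out with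
  | nil => simp
  | cons c cs ih =>
    simp only [List.foldl_cons]
    by_cases h : pvInB aSize c
    · rw [if_pos h, ih]
      simp only [mem_pvInsert]
      constructor
      · rintro ((he | hx) | ⟨d, hd, hpd, he⟩)
        · exact Or.inr ⟨c, List.mem_cons_self, h, he⟩
        · exact Or.inl hx
        · exact Or.inr ⟨d, List.mem_cons_of_mem _ hd, hpd, he⟩
      · rintro (hx | ⟨d, hd, hpd, he⟩)
        · exact Or.inl (Or.inr hx)
        · rcases List.mem_cons.mp hd with rfl | hd
          · exact Or.inl (Or.inl he)
          · exact Or.inr ⟨d, hd, hpd, he⟩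
    · rw [if_neg h, ih]
      constructor
      · rintro (hx | ⟨d, hd, hpd, he⟩)
        · exact Or.inl hx
        · exact Or.inr ⟨d, List.mem_cons_of_mem _ hd, hpd, he⟩
      · rintro (hx | ⟨d, hd, hpd, he⟩)
        · exact Or.inl hx
        · rcases List.mem_cons.mp hd with rfl | hd
          · exact absurd hpd h
          · exact Or.inr ⟨d, hd, hpd, he⟩

-- the filtered ordered-insertion fold: sortedness
theorem pairwise_foldl_ins (aSize : Int) (l : List (List Int)) (out : List (List Int))
    (h : out.Pairwise (· < ·)) :
    (l.foldl (fun o c => if pvInB aSize c then pvInsert o c else o) out).Pairwise (· < ·) := by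
  induction l generalizing out with
  | nil => simpa
  | cons c cs ih =>
    simp only [List.foldl_cons]
    by_cases hc : pvInB aSize c
    · exact ih _ (by simpa [hc] using pairwise_pvInsert out c h)
    · simpa [hc] using ih _ h

-- B's whole result: membership
theorem mem_alt (aSize s h : Int) (squares : List (List Int)) (x : List Int) :
    x ∈ squares.foldl (fun out sq =>
        (pvC16 s h (PySem.List.pyGetD sq 0 0) (PySem.List.pyGetD sq 1 0)).foldl
          (fun out c => if pvInB aSize c then pvInsert out c else out) out) []
      ↔ ∃ sq ∈ squares, ∃ c ∈ pvC16 s h (PySem.List.pyGetD sq 0 0) (PySem.List.pyGetD sq 1 0),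
          pvInB aSize c ∧ x = c := by
  rw [← List.foldl_flatMap, mem_foldl_ins]
  simp only [List.not_mem_nil, false_or, List.mem_flatMap]
  constructor
  · rintro ⟨c, ⟨sq, hsq, hc⟩, hp, he⟩
    exact ⟨sq, hsq, c, hc, hp, he⟩
  · rintro ⟨sq, hsq, c, hc, hp, he⟩
    exact ⟨c, ⟨sq, hsq, hc⟩, hp, he⟩

-- B's whole result: strictly sorted
theorem pairwise_alt (aSize s h : Int) (squares : List (List Int)) :
    (squares.foldl (fun out sq =>
        (pvC16 s h (PySem.List.pyGetD sq 0 0) (PySem.List.pyGetD sq 1 0)).foldl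
          (fun out c => if pvInB aSize c then pvInsert out c else out) out) []).Pairwise (· < ·) := by
  rw [← List.foldl_flatMap]
  exact pairwise_foldl_ins aSize _ [] (by simp)

-- the A-side filter test equals B's bounds test
theorem pvPred_eq (aSize a b : Int) :
    (!([a, b].any (fun n => decide (n < 0) || decide (n > aSize)))) = pvInB aSize [a, b] := by
  rw [Bool.eq_iff_iff]
  simp [pvInB, PySem.List.pyGetD, PySem.List.pyGet?, PySem.List.pyIdx?]
  omega

-- vertex-pool membership (pairs)
theorem pvMemV (s : Int) (squares : List (List Int)) (p : Int × Int) :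
    (p ∈ ((squares.flatMap (fun sq =>
      [[PySem.List.pyGetD sq 0 0, PySem.List.pyGetD sq 1 0],
       [PySem.List.pyGetD sq 0 0 + s, PySem.List.pyGetD sq 1 0],
       [PySem.List.pyGetD sq 0 0, PySem.List.pyGetD sq 1 0 + s],
       [PySem.List.pyGetD sq 0 0 + s, PySem.List.pyGetD sq 1 0 + s]])).map pvTup))
    ↔ ∃ sq ∈ squares, p ∈ [(PySem.List.pyGetD sq 0 0, PySem.List.pyGetD sq 1 0),
        (PySem.List.pyGetD sq 0 0 + s, PySem.List.pyGetD sq 1 0),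
        (PySem.List.pyGetD sq 0 0, PySem.List.pyGetD sq 1 0 + s),
        (PySem.List.pyGetD sq 0 0 + s, PySem.List.pyGetD sq 1 0 + s)] := by
  simp only [List.mem_map, List.mem_flatMap]
  constructor
  · rintro ⟨r, ⟨sq, hsq, hr⟩, rfl⟩
    refine ⟨sq, hsq, ?_⟩
    simp at hr ⊢
    rcases hr with h|h|h|h <;> simp [h, pvTup, PySem.List.pyGetD]
  · rintro ⟨sq, hsq, hp⟩
    refine ⟨pvLst p, ⟨sq, hsq, ?_⟩, pvTup_pvLst p⟩
    simp only [pvLst]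
    simp at hp ⊢
    rcases hp with h|h|h|h <;> simp [h]

-- the 16 coordinates of one square, as vertex + offset
theorem pvC16_char (s h X Y : Int) (x : List Int) :
    (∃ p ∈ ([(X, Y), (X + s, Y), (X, Y + s), (X + s, Y + s)] : List (Int × Int)),
       x ∈ ([[p.1 + h, p.2], [p.1 - h, p.2], [p.1, p.2 + h], [p.1, p.2 - h]] : List (List Int)))
    ↔ x ∈ pvC16 s h X Y := by
  simp only [pvC16, List.mem_cons, List.not_mem_nil, or_false]
  constructor
  · rintro ⟨p, hp, hx⟩
    rcases hp with rfl | rfl | rfl | rfl <;> rcases hx with h | h | h | h <;> simp [h]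
  · intro hx
    rcases hx with h|h|h|h|h|h|h|h|h|h|h|h|h|h|h|h
    · exact ⟨(X, Y), by simp, by simp [h]⟩
    · exact ⟨(X, Y), by simp, by simp [h]⟩
    · exact ⟨(X, Y), by simp, by simp [h]⟩
    · exact ⟨(X, Y), by simp, by simp [h]⟩
    · exact ⟨(X + s, Y), by simp, by simp [h]⟩
    · exact ⟨(X + s, Y), by simp, by simp [h]⟩
    · exact ⟨(X + s, Y), by simp, by simp [h]⟩
    · exact ⟨(X + s, Y), by simp, by simp [h]⟩
    · exact ⟨(X, Y + s), by simp, by simp [h]⟩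
    · exact ⟨(X, Y + s), by simp, by simp [h]⟩
    · exact ⟨(X, Y + s), by simp, by simp [h]⟩
    · exact ⟨(X, Y + s), by simp, by simp [h]⟩
    · exact ⟨(X + s, Y + s), by simp, by simp [h]⟩
    · exact ⟨(X + s, Y + s), by simp, by simp [h]⟩
    · exact ⟨(X + s, Y + s), by simp, by simp [h]⟩
    · exact ⟨(X + s, Y + s), by simp, by simp [h]⟩

-- membership in the A-side deduplicated coordinate pool (pairs)
theorem pvMemA (H : Int) (verts : List (Int × Int)) (ws : List (List Int))
    (hws : ∀ v, v ∈ ws ↔ ∃ p ∈ verts, v = pvLst p) (x : Int × Int) :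
    (x ∈ ((ws.flatMap (fun v =>
      [[PySem.List.pyGetD v 0 0 + H, PySem.List.pyGetD v 1 0],
       [PySem.List.pyGetD v 0 0 - H, PySem.List.pyGetD v 1 0],
       [PySem.List.pyGetD v 0 0, PySem.List.pyGetD v 1 0 + H],
       [PySem.List.pyGetD v 0 0, PySem.List.pyGetD v 1 0 - H]])).map pvTup))
    ↔ ∃ p ∈ verts, x ∈ [(p.1 + H, p.2), (p.1 - H, p.2), (p.1, p.2 + H), (p.1, p.2 - H)] := by
  simp only [List.mem_map, List.mem_flatMap, hws]
  constructor
  · rintro ⟨r, ⟨v, ⟨p, hp, rfl⟩, hr⟩, rfl⟩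
    refine ⟨p, hp, ?_⟩
    simp only [pvLst, PySem.List.pyGetD] at hr
    simp at hr ⊢
    rcases hr with h|h|h|h <;> simp [h, pvTup, PySem.List.pyGetD]
  · rintro ⟨p, hp, hx⟩
    refine ⟨pvLst x, ⟨pvLst p, ⟨p, hp, rfl⟩, ?_⟩, pvTup_pvLst x⟩
    simp only [pvLst, PySem.List.pyGetD]
    simp at hx ⊢
    rcases hx with h|h|h|h <;> simp [h]

theorem getDiamonds_eq_alt (aSize div : Int) (squares : List (List Int)) :
    getDiamonds aSize div squares = getDiamonds_alt aSize div squares := by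
  unfold getDiamonds getDiamonds_alt
  simp only [PySem.List.foldl_append_if_eq_filter
    (p := fun c : List Int => !(c.any (fun n => decide (n < 0) || decide (n > aSize)))),
    List.nil_append, pvFoldl_flatMap]
  set s := PySem.Int.floordiv aSize div with hs
  set h := PySem.Int.floordiv aSize (div * 2) with hh
  have hinst : (fun (a b : List Int) => a.decidableLT b)
      = ((inferInstance : LinearOrder (List Int)).toDecidableLT) := by
    funext a b; exact Subsingleton.elim _ _
  rw [hinst]
  apply PySem.List.sorted_eq_of_perm_of_pairwise_lt _ _ (fun r : List Int => r) ?_ (pairwise_alt aSize s h squares)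
  refine (List.perm_ext_iff_of_nodup ((pairwise_alt aSize s h squares).nodup)
    (((PySem.Set.nodup_ofList _).map pvLst_inj).filter _)).mpr ?_
  intro x
  rw [mem_alt, List.mem_filter]
  -- characterize the A side
  have hws : ∀ v, v ∈ @PySem.List.sorted (List Int) (List Int) List.instLT
        ((inferInstance : LinearOrder (List Int)).toDecidableLT)
        ((PySem.Set.ofList ((squares.flatMap (fun sq =>
        [[PySem.List.pyGetD sq 0 0, PySem.List.pyGetD sq 1 0],
         [PySem.List.pyGetD sq 0 0 + s, PySem.List.pyGetD sq 1 0],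
         [PySem.List.pyGetD sq 0 0, PySem.List.pyGetD sq 1 0 + s],
         [PySem.List.pyGetD sq 0 0 + s, PySem.List.pyGetD sq 1 0 + s]])).map pvTup)).map pvLst) (fun r => r) false
      ↔ ∃ p ∈ (squares.flatMap (fun sq =>
        [[PySem.List.pyGetD sq 0 0, PySem.List.pyGetD sq 1 0],
         [PySem.List.pyGetD sq 0 0 + s, PySem.List.pyGetD sq 1 0],
         [PySem.List.pyGetD sq 0 0, PySem.List.pyGetD sq 1 0 + s],
         [PySem.List.pyGetD sq 0 0 + s, PySem.List.pyGetD sq 1 0 + s]])).map pvTup, v = pvLst p := by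
    intro v
    rw [@PySem.List.mem_sorted (List Int) (List Int) List.instLT
      ((inferInstance : LinearOrder (List Int)).toDecidableLT)]
    simp only [List.mem_map, PySem.Set.mem_ofList]
    constructor
    · rintro ⟨p, hp, he⟩; exact ⟨p, hp, he.symm⟩
    · rintro ⟨p, hp, he⟩; exact ⟨p, hp, he.symm⟩
  constructor
  · -- B-side member → A-side member
    rintro ⟨sq, hsq, c, hc, hb, he⟩
    subst he
    rcases (pvC16_char s h (PySem.List.pyGetD sq 0 0) (PySem.List.pyGetD sq 1 0) x).mpr hc with ⟨p, hp4, hc4⟩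
    refine ⟨?_, ?_⟩
    · refine List.mem_map.mpr ⟨pvTup x, ?_, ?_⟩
      · rw [PySem.Set.mem_ofList]
        refine (pvMemA h _ _ hws (pvTup x)).mpr ⟨p, (pvMemV s squares p).mpr ⟨sq, hsq, hp4⟩, ?_⟩
        simp at hc4 ⊢
        rcases hc4 with e|e|e|e <;> simp [e, pvTup, PySem.List.pyGetD]
      · -- x is a two-element list, so pvLst (pvTup x) = x
        simp at hc4
        rcases hc4 with e|e|e|e <;> simp [e, pvTup, pvLst, PySem.List.pyGetD]
    · have hx2 : x = [(pvTup x).1, (pvTup x).2] := by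
        simp at hc4
        rcases hc4 with e|e|e|e <;> simp [e, pvTup, PySem.List.pyGetD]
      rw [hx2, pvPred_eq aSize]
      rw [hx2] at hb
      exact hb
  · -- A-side member → B-side member
    rintro ⟨hx, hp⟩
    rcases List.mem_map.mp hx with ⟨q, hq, rfl⟩
    rw [PySem.Set.mem_ofList] at hq
    rcases (pvMemA h _ _ hws q).mp hq with ⟨p, hpV, hq4⟩
    rcases (pvMemV s squares p).mp hpV with ⟨sq, hsq, hp4⟩
    refine ⟨sq, hsq, pvLst q, ?_, ?_, rfl⟩
    · refine (pvC16_char s h (PySem.List.pyGetD sq 0 0) (PySem.List.pyGetD sq 1 0) (pvLst q)).mp ?_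
      refine ⟨p, hp4, ?_⟩
      simp only [pvLst] at hq4 ⊢
      simp at hq4 ⊢
      rcases hq4 with e|e|e|e <;> simp [e]
    · have hp' : (!([q.1, q.2].any (fun n => decide (n < 0) || decide (n > aSize)))) = true := by
        simpa [pvLst] using hp
      simp only [pvLst]
      rw [← pvPred_eq aSize q.1 q.2]
      exact hp'

-- ===== VERDICT (by name: the statement is the Claim_ definition above) =====
theorem getDiamonds_spec : Claim_equal_getDiamonds := by
  intro aSize div squares _ _
  unfold Spec_getDiamonds
  exact getDiamonds_eq_alt aSize div squares
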